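-- pv_equiv track=rewrite | github.com/SamJacobsen/PO_Challenges | main.py | get_consonant_substrings
-- ===== SOURCE A (Python) =====
-- VOWELS = "aeiou"
--
-- def get_consonant_substrings(s: str) -> list:
--     if s and s.isalpha():
--         consonant_indexes: list = []
--         answer = set()
--
--         for index, c in enumerate(s):
--             if c not in VOWELS:
--                 answer.add(c)
--                 consonant_indexes.append(index)
--
--         answer = answer.union(index_substrings(consonant_indexes, s))
--         return sorted(answer)
--     return []
--
-- def index_substrings(indexes: list, s: str) -> set:
--     answer = set()
--     while len(indexes) > 1:
--         start = indexes.pop(0)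
--         for index in indexes:
--             sub_string = s[start:index+1]
--             answer.add(sub_string)
--     return answer
-- ===== SOURCE B (Python) =====
-- VOWELS = "aeiou"
--
-- def get_consonant_substrings(s: str) -> list:
--     if not (s and s.isalpha()):
--         return []
--     idxs = [i for i, c in enumerate(s) if c not in VOWELS]
--     result = set()
--     for k, i in enumerate(idxs):
--         for j in idxs[k:]:
--             result.add(s[i:j + 1])
--     return sorted(result)
-- ===== Notes on version B (the rewrite author's own statement) =====
-- stated objective: simpler
-- what changed: A's two phases (adding single consonants, then a destructive pop(0) while-loop helper over strict index pairs) are fused into one triangular loop over consonant-index pairs i<=j, whose i==j diagonal yields the single consonants.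
import Mathlib
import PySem

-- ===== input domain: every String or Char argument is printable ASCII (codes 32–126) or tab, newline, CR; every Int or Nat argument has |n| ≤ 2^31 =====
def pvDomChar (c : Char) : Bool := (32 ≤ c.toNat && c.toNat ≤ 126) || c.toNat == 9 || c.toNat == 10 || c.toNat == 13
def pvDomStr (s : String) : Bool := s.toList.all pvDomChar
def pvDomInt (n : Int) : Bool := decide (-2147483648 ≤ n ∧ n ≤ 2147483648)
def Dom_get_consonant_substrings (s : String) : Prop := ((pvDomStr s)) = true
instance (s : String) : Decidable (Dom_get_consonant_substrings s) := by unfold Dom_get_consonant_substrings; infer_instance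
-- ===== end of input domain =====

-- B fuses A's two phases (single-consonant adds + a pop(0) while-loop helper over strict
-- index pairs) into one triangular loop over consonant-index pairs i ≤ j (objective: simpler).

-- ===== PORT A =====
def pvVOWELS : List Char := "aeiou".toList

-- 'while len(indexes) > 1: start = indexes.pop(0); for index in indexes: answer.add(s[start:index+1])'
def pvIndexSubstringsGo (s : List Char) : List Int → PySem.Set String → PySem.Set String
  | [], answer => answer
  | start :: rest, answer =>
    if rest.isEmpty then answer
    else
      pvIndexSubstringsGo s rest
        (rest.foldl (fun a j =>
          PySem.Set.add a (String.ofList (PySem.List.slice s (some start) (some (j + 1))))) answer)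

def index_substrings (indexes : List Int) (s : List Char) : PySem.Set String :=
  pvIndexSubstringsGo s indexes PySem.Set.empty

def get_consonant_substrings (s : String) : List String :=
  if s ≠ "" ∧ PySem.Str.strIsalpha s then
    let st := (PySem.List.enumerate s.toList 0).foldl
      (fun (st : PySem.Set String × List Int) p =>
        if p.2 ∉ pvVOWELS then (PySem.Set.add st.1 (String.ofList [p.2]), st.2 ++ [p.1]) else st)
      (PySem.Set.empty, [])
    PySem.List.sorted (PySem.Set.union st.1 (index_substrings st.2 s.toList)) (fun x => x) false
  else []

-- ===== PORT B =====
def get_consonant_substrings_alt (s : String) : List String :=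
  if s ≠ "" ∧ PySem.Str.strIsalpha s then
    let cs := s.toList
    let idxs := (PySem.List.enumerate cs 0).filterMap
      (fun p => if p.2 ∉ pvVOWELS then some p.1 else none)
    let result := (PySem.List.enumerate idxs 0).foldl
      (fun r q =>
        (PySem.List.slice idxs (some q.1) none).foldl
          (fun r j =>
            PySem.Set.add r (String.ofList (PySem.List.slice cs (some q.2) (some (j + 1))))) r)
      PySem.Set.empty
    PySem.List.sorted result (fun x => x) false
  else []

-- ===== PRECONDITION & SPEC =====
def Spec_get_consonant_substrings (s : String) (out : List String) : Prop := out = get_consonant_substrings_alt s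
instance (s : String) (out : List String) : Decidable (Spec_get_consonant_substrings s out) := by unfold Spec_get_consonant_substrings; infer_instance

-- ===== CLAIM (what is proved, stated in full; the proofs are below) =====
def Claim_equal_get_consonant_substrings : Prop := ∀ (s : String), Dom_get_consonant_substrings s → Spec_get_consonant_substrings s (get_consonant_substrings s)

-- ===== LEMMAS AND PROOFS =====

-- s[i:j+1] as a String, the value both programs add for an index pair (i, j)
def pvF (cs : List Char) (i j : Int) : String :=
  String.ofList (PySem.List.slice cs (some i) (some (j + 1)))

theorem pv_foldA_eq (l : List (Int × Char)) (st : PySem.Set String × List Int) :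
    l.foldl
      (fun (st : PySem.Set String × List Int) p =>
        if p.2 ∉ pvVOWELS then (PySem.Set.add st.1 (String.ofList [p.2]), st.2 ++ [p.1]) else st) st
    = ((l.filter (fun p => decide (p.2 ∉ pvVOWELS))).foldl
         (fun a p => PySem.Set.add a (String.ofList [p.2])) st.1,
       st.2 ++ (l.filter (fun p => decide (p.2 ∉ pvVOWELS))).map (·.1)) := by
  induction l generalizing st with
  | nil => simp
  | cons h t ih =>
    rw [List.foldl_cons, ih, List.filter_cons]
    by_cases hc : h.2 ∉ pvVOWELS
    · rw [if_pos hc, if_pos (by simpa using hc)]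
      simp
    · rw [if_neg hc, if_neg (by simpa using hc)]

theorem pv_filterMap_eq (l : List (Int × Char)) :
    l.filterMap (fun p => if p.2 ∉ pvVOWELS then some p.1 else none)
      = (l.filter (fun p => decide (p.2 ∉ pvVOWELS))).map (·.1) := by
  induction l with
  | nil => rfl
  | cons h t ih =>
    rw [List.filterMap_cons, ih, List.filter_cons]
    by_cases hc : h.2 ∉ pvVOWELS
    · rw [if_pos hc, if_pos (by simpa using hc)]
      simp
    · rw [if_neg hc, if_neg (by simpa using hc)]

theorem pv_pair_sublist_cons {i j a : Int} {r : List Int} :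
    [i, j].Sublist (a :: r) ↔ (i = a ∧ j ∈ r) ∨ [i, j].Sublist r := by
  rw [List.sublist_cons_iff]
  constructor
  · rintro (h | ⟨t, ht, hs⟩)
    · exact Or.inr h
    · obtain ⟨rfl, rfl⟩ : i = a ∧ t = [j] := by
        injection ht with h1 h2; exact ⟨h1, h2.symm⟩
      exact Or.inl ⟨rfl, List.singleton_sublist.mp hs⟩
  · rintro (⟨rfl, hj⟩ | h)
    · exact Or.inr ⟨[j], rfl, List.singleton_sublist.mpr hj⟩
    · exact Or.inl h

theorem pv_pair_sublist_iff (i j : Int) (l : List Int) :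
    [i, j].Sublist l ↔ ∃ (k : Nat) (h : k < l.length), i = l[k] ∧ j ∈ l.drop (k + 1) := by
  induction l with
  | nil =>
    constructor
    · intro h; exact absurd h.length_le (by simp)
    · rintro ⟨k, hk, -⟩; simp at hk
  | cons a r ih =>
    rw [pv_pair_sublist_cons, ih]
    constructor
    · rintro (⟨rfl, hj⟩ | ⟨k, hk, rfl, hj⟩)
      · exact ⟨0, by simp, by simp, by simpa using hj⟩
      · exact ⟨k + 1, by simpa using hk, by simp, by simpa using hj⟩
    · rintro ⟨k, hk, hi, hj⟩
      cases k with
      | zero => exact Or.inl ⟨by simpa using hi, by simpa using hj⟩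
      | succ m =>
        exact Or.inr ⟨m, by simpa using hk, by simpa using hi, by simpa using hj⟩

theorem pv_mem_go (cs : List Char) (idxs : List Int) (ans : PySem.Set String) (x : String) :
    x ∈ pvIndexSubstringsGo cs idxs ans ↔
      x ∈ ans ∨ ∃ i j, [i, j].Sublist idxs ∧ x = pvF cs i j := by
  induction idxs generalizing ans with
  | nil => simp [pvIndexSubstringsGo]
  | cons a rest ih =>
    rw [pvIndexSubstringsGo]
    by_cases hrest : rest.isEmpty
    · have hr : rest = [] := by simpa [List.isEmpty_iff] using hrest
      subst hr
      rw [if_pos hrest]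
      constructor
      · exact Or.inl
      · rintro (hx | ⟨i, j, hs, _⟩)
        · exact hx
        · exact absurd hs.length_le (by simp)
    · rw [if_neg hrest, ih, PySem.Set.mem_foldl_add]
      constructor
      · rintro ((hx | ⟨b, hb, rfl⟩) | ⟨i, j, hs, rfl⟩)
        · exact Or.inl hx
        · exact Or.inr ⟨a, b, pv_pair_sublist_cons.mpr (Or.inl ⟨rfl, hb⟩), rfl⟩
        · exact Or.inr ⟨i, j, pv_pair_sublist_cons.mpr (Or.inr hs), rfl⟩
      · rintro (hx | ⟨i, j, hs, rfl⟩)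
        · exact Or.inl (Or.inl hx)
        · rcases pv_pair_sublist_cons.mp hs with ⟨rfl, hj⟩ | hs'
          · exact Or.inl (Or.inr ⟨j, hj, rfl⟩)
          · exact Or.inr ⟨i, j, hs', rfl⟩

theorem pv_nodup_foldl_add {β : Type} (l : List β) (f : β → String) (s : PySem.Set String)
    (hs : s.Nodup) : (l.foldl (fun s b => PySem.Set.add s (f b)) s).Nodup := by
  induction l generalizing s with
  | nil => exact hs
  | cons a t ih => exact ih _ (PySem.Set.nodup_add _ _ hs)

theorem pv_mem_nested (l : List (Int × Int)) (h : Int × Int → List Int)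
    (g : Int × Int → Int → String) (s : PySem.Set String) (x : String) :
    x ∈ l.foldl (fun r q => (h q).foldl (fun r j => PySem.Set.add r (g q j)) r) s ↔
      x ∈ s ∨ ∃ q ∈ l, ∃ j ∈ h q, x = g q j := by
  induction l generalizing s with
  | nil => simp
  | cons a t ih =>
    rw [List.foldl_cons, ih, PySem.Set.mem_foldl_add]
    constructor
    · rintro ((hx | ⟨j, hj, rfl⟩) | ⟨q, hq, j, hj, rfl⟩)
      · exact Or.inl hx
      · exact Or.inr ⟨a, List.mem_cons_self, j, hj, rfl⟩
      · exact Or.inr ⟨q, List.mem_cons_of_mem _ hq, j, hj, rfl⟩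
    · rintro (hx | ⟨q, hq, j, hj, rfl⟩)
      · exact Or.inl (Or.inl hx)
      · rcases List.mem_cons.mp hq with rfl | hq'
        · exact Or.inl (Or.inr ⟨j, hj, rfl⟩)
        · exact Or.inr ⟨q, hq', j, hj, rfl⟩

theorem pv_nodup_nested (l : List (Int × Int)) (h : Int × Int → List Int)
    (g : Int × Int → Int → String) (s : PySem.Set String) (hs : s.Nodup) :
    (l.foldl (fun r q => (h q).foldl (fun r j => PySem.Set.add r (g q j)) r) s).Nodup := by
  induction l generalizing s with
  | nil => exact hs
  | cons a t ih => exact ih _ (pv_nodup_foldl_add _ _ _ hs)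

theorem pv_diag_eq (cs : List Char) (m : Nat) (hm : m < cs.length) :
    pvF cs (m : Int) (m : Int) = String.ofList [cs[m]] := by
  unfold pvF
  have h1 : ((m : Int) + 1) = ((m : Int) + ((1 : Nat) : Int)) := by norm_num
  rw [h1, PySem.List.slice_natCast_add]
  congr 1
  rw [List.drop_eq_getElem_cons hm, List.take_succ_cons, List.take_zero]

-- every index A/B collect comes from enumerate, hence is a Nat-cast below the length
theorem pv_mem_filtered (cs : List Char) (p : Int × Char)
    (hp : p ∈ (PySem.List.enumerate cs 0).filter (fun p => decide (p.2 ∉ pvVOWELS))) :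
    ∃ (m : Nat) (h : m < cs.length), p = ((m : Int), cs[m]) := by
  have := List.mem_filter.mp hp |>.1
  rcases (PySem.List.mem_enumerate_iff _ _ _).mp this with ⟨k, hk, rfl⟩
  exact ⟨k, hk, by simp⟩

theorem get_consonant_substrings_spec' (s : String) :
    get_consonant_substrings s = get_consonant_substrings_alt s := by
  unfold get_consonant_substrings get_consonant_substrings_alt
  by_cases hguard : s ≠ "" ∧ PySem.Str.strIsalpha s
  · rw [if_pos hguard, if_pos hguard]
    set cs := s.toList with hcs
    set E := PySem.List.enumerate cs 0 with hE
    set filtered := E.filter (fun p => decide (p.2 ∉ pvVOWELS)) with hfil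
    set CI := filtered.map (·.1) with hCI
    -- A's state
    rw [pv_foldA_eq]
    simp only
    rw [pv_filterMap_eq]
    -- both sides: sorted of a nodup set; show the underlying sets are a permutation
    apply PySem.List.sorted_eq_sorted_of_perm _ _ _ (fun a b h => h)
    have hAn : (PySem.Set.union
        (filtered.foldl (fun a p => PySem.Set.add a (String.ofList [p.2])) PySem.Set.empty)
        (index_substrings ([] ++ CI) cs)).Nodup := by
      apply PySem.Set.nodup_union
      exact pv_nodup_foldl_add _ _ _ List.nodup_nil
    have hBn : ((PySem.List.enumerate CI 0).foldl
        (fun r q => (PySem.List.slice CI (some q.1) none).foldl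
          (fun r j => PySem.Set.add r
            (String.ofList (PySem.List.slice cs (some q.2) (some (j + 1))))) r)
        PySem.Set.empty).Nodup := pv_nodup_nested _ _ _ _ List.nodup_nil
    rw [List.perm_ext_iff_of_nodup hAn hBn]
    intro x
    -- membership on the A side
    have hA : x ∈ PySem.Set.union
        (filtered.foldl (fun a p => PySem.Set.add a (String.ofList [p.2])) PySem.Set.empty)
        (index_substrings ([] ++ CI) cs) ↔
        (∃ p ∈ filtered, x = String.ofList [p.2]) ∨
          ∃ i j, [i, j].Sublist CI ∧ x = pvF cs i j := by
      rw [PySem.Set.mem_union]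
      unfold index_substrings
      rw [pv_mem_go, PySem.Set.mem_foldl_add]
      simp
    -- membership on the B side
    have hB : x ∈ (PySem.List.enumerate CI 0).foldl
        (fun r q => (PySem.List.slice CI (some q.1) none).foldl
          (fun r j => PySem.Set.add r
            (String.ofList (PySem.List.slice cs (some q.2) (some (j + 1))))) r)
        PySem.Set.empty ↔
        ∃ q ∈ PySem.List.enumerate CI 0, ∃ j ∈ PySem.List.slice CI (some q.1) none,
          x = pvF cs q.2 j := by
      rw [pv_mem_nested]
      simp [pvF]
    rw [hA, hB]
    -- rephrase the B side through drop / getElem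
    have hBiff : (∃ q ∈ PySem.List.enumerate CI 0, ∃ j ∈ PySem.List.slice CI (some q.1) none,
          x = pvF cs q.2 j) ↔
        (∃ (k : Nat) (h : k < CI.length), x = pvF cs CI[k] CI[k]) ∨
          ∃ i j, [i, j].Sublist CI ∧ x = pvF cs i j := by
      constructor
      · rintro ⟨q, hq, j, hj, rfl⟩
        rcases (PySem.List.mem_enumerate_iff _ _ _).mp hq with ⟨k, hk, rfl⟩
        simp only at hj ⊢
        have h0 : ((0 : Int) + (k : Int)) = ((k : Int)) := by ring
        rw [h0, PySem.List.slice_from_natCast] at hj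
        rw [List.drop_eq_getElem_cons hk] at hj
        rcases List.mem_cons.mp hj with rfl | hj'
        · exact Or.inl ⟨k, hk, by simp⟩
        · exact Or.inr ⟨CI[k], j, (pv_pair_sublist_iff _ _ _).mpr ⟨k, hk, rfl, hj'⟩,
            by simp⟩
      · rintro (⟨k, hk, rfl⟩ | ⟨i, j, hs, rfl⟩)
        · refine ⟨((0 : Int) + (k : Int), CI[k]),
            (PySem.List.mem_enumerate_iff _ _ _).mpr ⟨k, hk, rfl⟩, CI[k], ?_, rfl⟩
          have h0 : ((0 : Int) + (k : Int)) = ((k : Int)) := by ring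
          rw [h0, PySem.List.slice_from_natCast, List.drop_eq_getElem_cons hk]
          exact List.mem_cons_self
        · rcases (pv_pair_sublist_iff _ _ _).mp hs with ⟨k, hk, rfl, hj⟩
          refine ⟨((0 : Int) + (k : Int), CI[k]),
            (PySem.List.mem_enumerate_iff _ _ _).mpr ⟨k, hk, rfl⟩, j, ?_, rfl⟩
          have h0 : ((0 : Int) + (k : Int)) = ((k : Int)) := by ring
          rw [h0, PySem.List.slice_from_natCast, List.drop_eq_getElem_cons hk]
          exact List.mem_cons_of_mem _ hj
    rw [hBiff]
    -- the single-consonant adds are exactly the diagonal pairs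
    have hdiag : (∃ p ∈ filtered, x = String.ofList [p.2]) ↔
        ∃ (k : Nat) (h : k < CI.length), x = pvF cs CI[k] CI[k] := by
      constructor
      · rintro ⟨p, hp, rfl⟩
        rcases List.mem_iff_getElem.mp hp with ⟨k, hk, rfl⟩
        rcases pv_mem_filtered cs filtered[k] (by exact List.getElem_mem hk) with ⟨m, hm, hpe⟩
        have hkCI : k < CI.length := by simpa [hCI] using hk
        refine ⟨k, hkCI, ?_⟩
        have h1 : CI[k] = filtered[k].1 := by simp [hCI]
        rw [h1, hpe]
        simp only
        rw [pv_diag_eq cs m hm]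
      · rintro ⟨k, hk, rfl⟩
        have hk' : k < filtered.length := by simpa [hCI] using hk
        refine ⟨filtered[k], List.getElem_mem hk', ?_⟩
        rcases pv_mem_filtered cs filtered[k] (List.getElem_mem hk') with ⟨m, hm, hpe⟩
        have h1 : CI[k] = filtered[k].1 := by simp [hCI]
        rw [h1, hpe]
        simp only
        rw [pv_diag_eq cs m hm]
    rw [hdiag]
  · rw [if_neg hguard, if_neg hguard]

-- ===== VERDICT (by name: the statement is the Claim_ definition above) =====
theorem get_consonant_substrings_spec : Claim_equal_get_consonant_substrings := by
  intro s _
  exact get_consonant_substrings_spec' s
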